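-- pv_equiv track=rewrite | github.com/Atharva-Kanherkar/smart-meeting-agent | agents/coordinator_agent.py | _parse_people_data
-- ===== SOURCE A (Python) =====
-- def _parse_people_data(people_data):
--     """Parse people data into list of attendees."""
--     attendees = []
--     if not people_data:
--         return attendees
--
--     # Extract attendee information
--     lines = people_data.split('\n')
--     current_person = {}
--
--     for line in lines:
--         line = line.strip()
--         if '@' in line and line.startswith('**') and line.endswith(')**'):
--             if current_person:
--                 attendees.append(current_person)
--             # Extract name and email
--             parts = line.strip('*').split('(')
--             if len(parts) >= 2:
--                 email = parts[0].strip()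
--                 name = parts[1].rstrip(')').strip()
--                 current_person = {'email': email, 'name': name}
--             else:
--                 current_person = {'email': line.strip('*'), 'name': 'Unknown'}
--         elif 'Role:' in line:
--             current_person['role'] = line.split('Role:')[1].strip()
--         elif 'Background:' in line:
--             current_person['background'] = line.split('Background:')[1].strip()
--         elif 'Expertise:' in line:
--             current_person['expertise'] = line.split('Expertise:')[1].strip()
--         elif 'Context:' in line:
--             current_person['context'] = line.split('Context:')[1].strip()
--
--     if current_person:
--         attendees.append(current_person)
--
--     return attendees
-- ===== SOURCE B (Python) =====
-- def _parse_people_data(people_data):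
--     """Parse people data into list of attendees (block-split re-implementation)."""
--     if not people_data:
--         return []
--
--     def is_header(line):
--         return '@' in line and line.startswith('**') and line.endswith(')**')
--
--     # Pass 1: group stripped lines into blocks; a leading block with no header,
--     # then one block per header line.
--     blocks = [(None, [])]
--     for raw in people_data.split('\n'):
--         line = raw.strip()
--         if is_header(line):
--             blocks.append((line, []))
--         else:
--             blocks[-1][1].append(line)
--
--     # Pass 2: convert each block to a dict; keep the non-empty ones, in order.
--     tags = (('role', 'Role:'), ('background', 'Background:'),
--             ('expertise', 'Expertise:'), ('context', 'Context:'))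
--
--     result = []
--     for header, body in blocks:
--         if header is None:
--             person = {}
--         else:
--             parts = header.strip('*').split('(')
--             if len(parts) >= 2:
--                 person = {'email': parts[0].strip(),
--                           'name': parts[1].rstrip(')').strip()}
--             else:
--                 person = {'email': header.strip('*'), 'name': 'Unknown'}
--         for line in body:
--             for key, tag in tags:
--                 if tag in line:
--                     person[key] = line.split(tag)[1].strip()
--                     break
--         if person:
--             result.append(person)
--     return result
-- ===== Notes on version B (the rewrite author's own statement) =====
-- stated objective: alternative
-- what changed: A's single stateful loop (mutating a current_person dict and flushing it into the result at each header and at the end) is replaced by a two-pass block decomposition: pass 1 splits the stripped lines into a leading block plus one block per header line, pass 2 converts each block independently to a dict and keeps the non-empty ones in order.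
import Mathlib
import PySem

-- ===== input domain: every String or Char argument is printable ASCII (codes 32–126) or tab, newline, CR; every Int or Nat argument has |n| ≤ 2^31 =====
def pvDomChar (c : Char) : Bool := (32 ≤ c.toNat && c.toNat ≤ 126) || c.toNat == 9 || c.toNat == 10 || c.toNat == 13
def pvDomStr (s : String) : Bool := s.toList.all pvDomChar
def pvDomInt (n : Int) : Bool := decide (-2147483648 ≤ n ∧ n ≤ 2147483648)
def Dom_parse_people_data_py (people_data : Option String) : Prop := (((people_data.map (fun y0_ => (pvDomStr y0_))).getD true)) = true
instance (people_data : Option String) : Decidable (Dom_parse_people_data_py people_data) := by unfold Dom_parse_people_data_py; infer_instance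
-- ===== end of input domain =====

-- B re-implements A's single stateful line loop as two passes (split the lines into header
-- blocks, then convert each block to a dict); same return value, objective: alternative decomposition.

set_option maxHeartbeats 1000000

-- hand port of Python's str.rstrip(chars) (PySem has no rstrip-with-chars primitive):
-- drop from the right every character occurring in `chars`; exact on all strings.
def pvRstripChars (s : String) (chars : String) : String :=
  String.ofList ((s.toList.reverse.dropWhile (fun c => c ∈ chars.toList)).reverse)

-- s.split(sep) for a NON-EMPTY literal sep: Str.split? is none only for sep = "", so getD is exact here
def pvSplit (s : String) (sep : String) : List String :=
  (PySem.Str.split? s sep).getD []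

-- ===== PORT A =====
-- one loop iteration of A: strip the line, header test, elif chain, mutate (attendees, current_person)
def pvStepA (st : List (PySem.Dict String String) × PySem.Dict String String) (raw : String) :
    List (PySem.Dict String String) × PySem.Dict String String :=
  if PySem.Str.isIn "@" (PySem.Str.strip raw) && PySem.Str.startswith (PySem.Str.strip raw) "**"
      && PySem.Str.endswith (PySem.Str.strip raw) ")**" then
    if 2 ≤ (pvSplit (PySem.Str.stripChars (PySem.Str.strip raw) "*") "(").length then
      ((if st.2.items.isEmpty then st.1 else st.1 ++ [st.2]),
        ((PySem.Dict.empty).insert "email"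
            (PySem.Str.strip (PySem.List.pyGetD (pvSplit (PySem.Str.stripChars (PySem.Str.strip raw) "*") "(") 0 ""))).insert
          "name"
          (PySem.Str.strip (pvRstripChars (PySem.List.pyGetD (pvSplit (PySem.Str.stripChars (PySem.Str.strip raw) "*") "(") 1 "") ")")))
    else
      ((if st.2.items.isEmpty then st.1 else st.1 ++ [st.2]),
        ((PySem.Dict.empty).insert "email" (PySem.Str.stripChars (PySem.Str.strip raw) "*")).insert "name" "Unknown")
  else if PySem.Str.isIn "Role:" (PySem.Str.strip raw) then
    (st.1, st.2.insert "role" (PySem.Str.strip (PySem.List.pyGetD (pvSplit (PySem.Str.strip raw) "Role:") 1 "")))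
  else if PySem.Str.isIn "Background:" (PySem.Str.strip raw) then
    (st.1, st.2.insert "background" (PySem.Str.strip (PySem.List.pyGetD (pvSplit (PySem.Str.strip raw) "Background:") 1 "")))
  else if PySem.Str.isIn "Expertise:" (PySem.Str.strip raw) then
    (st.1, st.2.insert "expertise" (PySem.Str.strip (PySem.List.pyGetD (pvSplit (PySem.Str.strip raw) "Expertise:") 1 "")))
  else if PySem.Str.isIn "Context:" (PySem.Str.strip raw) then
    (st.1, st.2.insert "context" (PySem.Str.strip (PySem.List.pyGetD (pvSplit (PySem.Str.strip raw) "Context:") 1 "")))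
  else st

def parse_people_data_py (people_data : Option String) : List (List (String × String)) :=
  match people_data with
  | none => []
  | some s =>
    if s = "" then []
    else
      ((if ((pvSplit s "\n").foldl pvStepA ([], PySem.Dict.empty)).2.items.isEmpty then
          ((pvSplit s "\n").foldl pvStepA ([], PySem.Dict.empty)).1
        else
          ((pvSplit s "\n").foldl pvStepA ([], PySem.Dict.empty)).1
            ++ [((pvSplit s "\n").foldl pvStepA ([], PySem.Dict.empty)).2])).map
        (fun d => d.items)

-- ===== PORT B =====
def pvIsHeaderB (line : String) : Bool :=
  PySem.Str.isIn "@" line && PySem.Str.startswith line "**" && PySem.Str.endswith line ")**"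

-- pass 1 step: start a new block on a header line, otherwise append to the current block's body
def pvBlockStepB (st : List (Option String × List String) × (Option String × List String))
    (raw : String) : List (Option String × List String) × (Option String × List String) :=
  if pvIsHeaderB (PySem.Str.strip raw) then (st.1 ++ [st.2], (some (PySem.Str.strip raw), []))
  else (st.1, (st.2.1, st.2.2 ++ [PySem.Str.strip raw]))

def pvTagsB : List (String × String) :=
  [("role", "Role:"), ("background", "Background:"), ("expertise", "Expertise:"), ("context", "Context:")]

-- pass 2: apply one body line to the person dict (first matching tag wins, as in B's break)
def pvAttrStepB (p : PySem.Dict String String) (line : String) : PySem.Dict String String :=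
  match pvTagsB.find? (fun t => PySem.Str.isIn t.2 line) with
  | some t => p.insert t.1 (PySem.Str.strip (PySem.List.pyGetD (pvSplit line t.2) 1 ""))
  | none => p

def pvInitDictB (header : Option String) : PySem.Dict String String :=
  match header with
  | none => PySem.Dict.empty
  | some h =>
    if 2 ≤ (pvSplit (PySem.Str.stripChars h "*") "(").length then
      ((PySem.Dict.empty).insert "email"
          (PySem.Str.strip (PySem.List.pyGetD (pvSplit (PySem.Str.stripChars h "*") "(") 0 ""))).insert
        "name"
        (PySem.Str.strip (pvRstripChars (PySem.List.pyGetD (pvSplit (PySem.Str.stripChars h "*") "(") 1 "") ")"))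
    else
      ((PySem.Dict.empty).insert "email" (PySem.Str.stripChars h "*")).insert "name" "Unknown"

def pvBlockDictB (b : Option String × List String) : PySem.Dict String String :=
  b.2.foldl pvAttrStepB (pvInitDictB b.1)

def parse_people_data_py_alt (people_data : Option String) : List (List (String × String)) :=
  match people_data with
  | none => []
  | some s =>
    if s = "" then []
    else
      (((((pvSplit s "\n").foldl pvBlockStepB ([], (none, []))).1
            ++ [((pvSplit s "\n").foldl pvBlockStepB ([], (none, []))).2]).map
          pvBlockDictB).filter (fun d => !d.items.isEmpty)).map (fun d => d.items)

-- ===== PRECONDITION & SPEC =====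
def Spec_parse_people_data_py (people_data : Option String) (out : List (List (String × String))) : Prop := out = parse_people_data_py_alt people_data
instance (people_data : Option String) (out : List (List (String × String))) : Decidable (Spec_parse_people_data_py people_data out) := by unfold Spec_parse_people_data_py; infer_instance

-- ===== CLAIM (what is proved, stated in full; the proofs are below) =====
def Claim_equal_parse_people_data_py : Prop := ∀ (people_data : Option String), Dom_parse_people_data_py people_data → Spec_parse_people_data_py people_data (parse_people_data_py people_data)

-- ===== LEMMAS AND PROOFS =====

-- common recursive shape of both results: current person × remaining lines ↦ emitted dicts
def pvF (d : PySem.Dict String String) : List String → List (PySem.Dict String String)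
  | [] => if d.items.isEmpty then [] else [d]
  | raw :: t =>
    if pvIsHeaderB (PySem.Str.strip raw) then
      (if d.items.isEmpty then [] else [d]) ++ pvF (pvInitDictB (some (PySem.Str.strip raw))) t
    else pvF (pvAttrStepB d (PySem.Str.strip raw)) t

-- proof-side recursive form of B's pass-1 block list
def pvBlocksR (cur : Option String × List String) : List String → List (Option String × List String)
  | [] => [cur]
  | raw :: t =>
    if pvIsHeaderB (PySem.Str.strip raw) then cur :: pvBlocksR (some (PySem.Str.strip raw), []) t
    else pvBlocksR (cur.1, cur.2 ++ [PySem.Str.strip raw]) t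

lemma stepA_header (st : List (PySem.Dict String String) × PySem.Dict String String) (raw : String)
    (h : pvIsHeaderB (PySem.Str.strip raw) = true) :
    pvStepA st raw =
      ((if st.2.items.isEmpty then st.1 else st.1 ++ [st.2]),
        pvInitDictB (some (PySem.Str.strip raw))) := by
  simp only [pvIsHeaderB] at h
  simp only [pvStepA, pvInitDictB, h, if_true]
  split_ifs <;> rfl

lemma stepA_attr (st : List (PySem.Dict String String) × PySem.Dict String String) (raw : String)
    (h : pvIsHeaderB (PySem.Str.strip raw) = false) :
    pvStepA st raw = (st.1, pvAttrStepB st.2 (PySem.Str.strip raw)) := by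
  simp only [pvIsHeaderB] at h
  simp only [pvStepA, pvAttrStepB, pvTagsB, List.find?, h, Bool.false_eq_true, if_false]
  cases hR : PySem.Str.isIn "Role:" (PySem.Str.strip raw) <;>
    cases hB : PySem.Str.isIn "Background:" (PySem.Str.strip raw) <;>
      cases hE : PySem.Str.isIn "Expertise:" (PySem.Str.strip raw) <;>
        cases hC : PySem.Str.isIn "Context:" (PySem.Str.strip raw) <;>
          simp

lemma A_eq_F (ls : List String) :
    ∀ st : List (PySem.Dict String String) × PySem.Dict String String,
      (if ((ls.foldl pvStepA st).2).items.isEmpty then (ls.foldl pvStepA st).1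
       else (ls.foldl pvStepA st).1 ++ [(ls.foldl pvStepA st).2]) = st.1 ++ pvF st.2 ls := by
  induction ls with
  | nil =>
    intro st
    simp only [List.foldl_nil, pvF]
    split_ifs <;> simp
  | cons raw t ih =>
    intro st
    rw [List.foldl_cons, ih (pvStepA st raw)]
    by_cases h : pvIsHeaderB (PySem.Str.strip raw) = true
    · rw [stepA_header st raw h]
      simp only [pvF, h, if_true]
      split_ifs <;> simp
    · rw [stepA_attr st raw (Bool.eq_false_iff.mpr h)]
      simp only [pvF, h, Bool.false_eq_true, if_false]

lemma blocks_fold (ls : List String) :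
    ∀ st : List (Option String × List String) × (Option String × List String),
      (ls.foldl pvBlockStepB st).1 ++ [(ls.foldl pvBlockStepB st).2] =
        st.1 ++ pvBlocksR st.2 ls := by
  induction ls with
  | nil => intro st; simp [pvBlocksR]
  | cons raw t ih =>
    intro st
    rw [List.foldl_cons, ih (pvBlockStepB st raw)]
    by_cases h : pvIsHeaderB (PySem.Str.strip raw) = true
    · simp only [pvBlockStepB, pvBlocksR, h, if_true]
      simp [List.append_assoc]
    · simp only [pvBlockStepB, pvBlocksR, h, Bool.false_eq_true, if_false]

lemma B_eq_F (ls : List String) : ∀ cur : Option String × List String,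
    ((pvBlocksR cur ls).map pvBlockDictB).filter (fun d => !d.items.isEmpty) =
      pvF (pvBlockDictB cur) ls := by
  induction ls with
  | nil =>
    intro cur
    simp only [pvBlocksR, pvF, List.map_cons, List.map_nil, List.filter_cons, List.filter_nil]
    cases hb : (pvBlockDictB cur).items.isEmpty with
    | true => simp only [Bool.not_true, Bool.false_eq_true, if_false, if_true]
    | false => simp only [Bool.not_false, if_true, Bool.false_eq_true, if_false]
  | cons raw t ih =>
    intro cur
    by_cases h : pvIsHeaderB (PySem.Str.strip raw) = true
    · simp only [pvBlocksR, pvF, h, if_true, List.map_cons, List.filter_cons]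
      rw [ih (some (PySem.Str.strip raw), [])]
      have hinit : pvBlockDictB (some (PySem.Str.strip raw), []) = pvInitDictB (some (PySem.Str.strip raw)) := by
        simp only [pvBlockDictB, List.foldl_nil]
      rw [hinit]
      cases hb : (pvBlockDictB cur).items.isEmpty with
      | true => simp only [Bool.not_true, Bool.false_eq_true, if_false, if_true, List.nil_append]
      | false => simp only [Bool.not_false, if_true, Bool.false_eq_true, if_false, List.singleton_append]
    · simp only [pvBlocksR, pvF, h, Bool.false_eq_true, if_false]
      rw [ih (cur.1, cur.2 ++ [PySem.Str.strip raw])]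
      have hstep : pvBlockDictB (cur.1, cur.2 ++ [PySem.Str.strip raw]) =
          pvAttrStepB (pvBlockDictB cur) (PySem.Str.strip raw) := by
        simp only [pvBlockDictB, List.foldl_append, List.foldl_cons, List.foldl_nil]
      rw [hstep]

-- ===== VERDICT (by name: the statement is the Claim_ definition above) =====
theorem parse_people_data_py_spec : Claim_equal_parse_people_data_py := by
  intro pd _
  unfold Spec_parse_people_data_py
  match pd with
  | none => rfl
  | some s =>
    simp only [parse_people_data_py, parse_people_data_py_alt]
    by_cases hs : s = ""
    · simp [hs]
    · simp only [hs, if_false]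
      rw [A_eq_F (pvSplit s "\n") ([], PySem.Dict.empty),
        blocks_fold (pvSplit s "\n") ([], (none, [])), List.nil_append, List.nil_append,
        B_eq_F (pvSplit s "\n") (none, [])]
      have hempty : pvBlockDictB (none, []) = PySem.Dict.empty := by
        simp only [pvBlockDictB, List.foldl_nil, pvInitDictB]
      rw [hempty]
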